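-- pv_equiv track=rewrite | github.com/santhoshpemmaka/problemsolving | Reversecharacters.py | reverse_characters
-- ===== SOURCE A (Python) =====
-- def reverse_characters(string):
--     # We have convert into list because of the string didn't support
--     # assignment symbol.
--     string = list(string)
--     l = len(string)-1
--     r = 0
--     while r<l:
--         # Didn't disrupt the special characters.
--         if not string[r].isalpha():
--             r = r+1
--         elif not string[l].isalpha():
--             l = l-1
--         else:
--         # swap only the cahracters in the string
--             string[r],string[l]=string[l],string[r]
--             r=r+1
--             l = l-1
--
--     return "".join(string)
-- ===== SOURCE B (Python) =====
-- def reverse_characters(string):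
--     # extract the letters, reverse them, then re-place them over the
--     # non-alpha skeleton in one pass
--     letters = [c for c in string if c.isalpha()]
--     letters.reverse()
--     it = iter(letters)
--     return "".join(next(it) if c.isalpha() else c for c in string)
-- ===== Notes on version B (the rewrite author's own statement) =====
-- stated objective: idiomatic
-- what changed: Replaces the converging two-pointer in-place swap loop with an extract-reverse-reassemble pair of passes: collect the alphabetic characters, reverse them, and emit them back over the fixed non-alpha skeleton in a single join.
import Mathlib
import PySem

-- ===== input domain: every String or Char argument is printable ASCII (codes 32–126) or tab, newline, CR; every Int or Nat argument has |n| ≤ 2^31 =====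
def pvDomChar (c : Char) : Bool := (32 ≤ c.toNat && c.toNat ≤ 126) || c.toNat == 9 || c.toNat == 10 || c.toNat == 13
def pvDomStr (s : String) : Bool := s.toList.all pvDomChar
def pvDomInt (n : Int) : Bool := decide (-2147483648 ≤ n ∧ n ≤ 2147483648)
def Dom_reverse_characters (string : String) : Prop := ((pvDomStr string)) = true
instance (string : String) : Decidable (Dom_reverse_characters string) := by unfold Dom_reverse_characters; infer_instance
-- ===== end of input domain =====

-- B replaces A's converging two-pointer swap loop by extract-reverse-reassemble (idiomatic, same cost).

-- ===== PORT A =====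
-- A's while loop: converging pointers r, l over the char list, swapping alpha chars.
-- string[r]/string[l] ported with pyGet? (the `| _, _ => s` arm is the out-of-range case,
-- unreachable in A's calls since 0 ≤ r < l ≤ len-1 inside the loop); the swap uses
-- List.set at r.toNat/l.toNat, exact here since both indices are nonnegative in the loop.
def pvRevLoopA (s : List Char) (r l : Int) : List Char :=
  if _h : r < l then
    match PySem.List.pyGet? s r, PySem.List.pyGet? s l with
    | some a, some b =>
      if ¬ PySem.Chars.isalpha a then pvRevLoopA s (r + 1) l
      else if ¬ PySem.Chars.isalpha b then pvRevLoopA s r (l - 1)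
      else pvRevLoopA ((s.set r.toNat b).set l.toNat a) (r + 1) (l - 1)
    | _, _ => s
  else s
termination_by (l - r).toNat
decreasing_by all_goals omega

def reverse_characters (string : String) : String :=
  String.ofList (pvRevLoopA string.toList 0 ((string.toList.length : Int) - 1))

-- ===== PORT B =====
-- the join over the generator: consume the reversed letters from the front as alpha chars pass by
def pvMerge : List Char → List Char → List Char
  | [], _ => []
  | c :: t, rs =>
      if PySem.Chars.isalpha c then rs.headD 'a' :: pvMerge t rs.tail
      else c :: pvMerge t rs

def reverse_characters_alt (string : String) : String :=
  let letters := (string.toList.filter (fun c => PySem.Chars.isalpha c)).reverse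
  String.ofList (pvMerge string.toList letters)

-- ===== PRECONDITION & SPEC =====
def Spec_reverse_characters (string : String) (out : String) : Prop := out = reverse_characters_alt string
instance (string : String) (out : String) : Decidable (Spec_reverse_characters string out) := by unfold Spec_reverse_characters; infer_instance

-- ===== CLAIM (what is proved, stated in full; the proofs are below) =====
def Claim_equal_reverse_characters : Prop := ∀ (string : String), Dom_reverse_characters string → Spec_reverse_characters string (reverse_characters string)

-- ===== LEMMAS AND PROOFS =====

def pvAlpha (c : Char) : Bool := PySem.Chars.isalpha c

def pvPlace (xs : List Char) : List Char := pvMerge xs ((xs.filter pvAlpha).reverse)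

theorem pvMerge_append (ys zs rs : List Char) :
    pvMerge (ys ++ zs) rs = pvMerge ys rs ++ pvMerge zs (rs.drop (ys.filter pvAlpha).length) := by
  induction ys generalizing rs with
  | nil => simp [pvMerge]
  | cons c t ih =>
    simp only [List.cons_append, pvMerge]
    by_cases hc : PySem.Chars.isalpha c
    · have hflen : ((c :: t).filter pvAlpha).length = (t.filter pvAlpha).length + 1 := by
        simp [pvAlpha, hc]
      have hdt : rs.drop ((t.filter pvAlpha).length + 1) = rs.tail.drop (t.filter pvAlpha).length := by
        rw [show (t.filter pvAlpha).length + 1 = 1 + (t.filter pvAlpha).length by omega,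
            ← List.drop_drop, List.drop_one]
      rw [if_pos hc, if_pos hc, ih, hflen, hdt]
      simp
    · have hflen : ((c :: t).filter pvAlpha).length = (t.filter pvAlpha).length := by
        simp [pvAlpha, hc]
      rw [if_neg hc, if_neg hc, ih, hflen]
      simp

theorem pvMerge_extra (xs rs extra : List Char)
    (h : (xs.filter pvAlpha).length ≤ rs.length) :
    pvMerge xs (rs ++ extra) = pvMerge xs rs := by
  induction xs generalizing rs with
  | nil => simp [pvMerge]
  | cons c t ih =>
    by_cases hc : PySem.Chars.isalpha c
    · cases rs with
      | nil => simp [pvAlpha, hc] at h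
      | cons r rt =>
        simp only [pvMerge, hc, if_pos, List.cons_append, List.headD_cons, List.tail_cons]
        rw [ih rt (by simpa [pvAlpha, hc] using h)]
    · simp only [pvMerge]
      rw [if_neg hc, if_neg hc, ih rs (by simpa [pvAlpha, hc] using h)]

theorem pvPlace_cons_notalpha (c : Char) (t : List Char) (hc : ¬ PySem.Chars.isalpha c) :
    pvPlace (c :: t) = c :: pvPlace t := by
  simp [pvPlace, pvAlpha, hc, pvMerge]

theorem pvPlace_concat_notalpha (ys : List Char) (b : Char) (hb : ¬ PySem.Chars.isalpha b) :
    pvPlace (ys ++ [b]) = pvPlace ys ++ [b] := by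
  simp only [pvPlace]
  rw [List.filter_append, pvMerge_append]
  simp [pvAlpha, hb, pvMerge]

theorem pvPlace_both_alpha (a b : Char) (ys : List Char)
    (ha : PySem.Chars.isalpha a) (hb : PySem.Chars.isalpha b) :
    pvPlace (a :: ys ++ [b]) = b :: pvPlace ys ++ [a] := by
  simp only [pvPlace]
  have hf : ((a :: ys ++ [b]).filter pvAlpha).reverse
      = b :: (ys.filter pvAlpha).reverse ++ [a] := by
    simp [pvAlpha, ha, hb]
  rw [hf]
  have step1 : pvMerge (a :: ys ++ [b]) (b :: (ys.filter pvAlpha).reverse ++ [a])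
      = b :: pvMerge (ys ++ [b]) ((ys.filter pvAlpha).reverse ++ [a]) := by
    simp only [List.cons_append, pvMerge]
    rw [if_pos ha]
    simp
  rw [step1, pvMerge_append ys [b] ((ys.filter pvAlpha).reverse ++ [a]),
      pvMerge_extra ys ((ys.filter pvAlpha).reverse) [a] (by simp),
      show (ys.filter pvAlpha).length = ((ys.filter pvAlpha).reverse).length by simp,
      List.drop_left]
  simp [pvMerge, hb]

theorem pvPlace_singleton (c : Char) : pvPlace [c] = [c] := by
  by_cases hc : PySem.Chars.isalpha c <;> simp [pvPlace, pvAlpha, hc, pvMerge]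

-- the loop invariant: the loop result is the untouched outside plus pvPlace of the live segment
theorem pvLoop_eq (n : Nat) : ∀ (s : List Char) (r l : Nat), l < s.length → r ≤ l + 1 →
    l + 1 - r = n →
    pvRevLoopA s (r : Int) (l : Int)
      = s.take r ++ pvPlace ((s.drop r).take (l + 1 - r)) ++ s.drop (l + 1) := by
  induction n using Nat.strong_induction_on with
  | _ n ih =>
    intro s r l hl hr hn
    by_cases hcmp : r < l
    · have hrlen : r < s.length := by omega
      have hga : PySem.List.pyGet? s (r : Int) = some s[r] := by
        simp [List.getElem?_eq_getElem hrlen]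
      have hgb : PySem.List.pyGet? s (l : Int) = some s[l] := by
        simp [List.getElem?_eq_getElem hl]
      rw [pvRevLoopA, dif_pos (by exact_mod_cast hcmp), hga, hgb]
      dsimp only
      by_cases hA : PySem.Chars.isalpha s[r]
      · by_cases hB : PySem.Chars.isalpha s[l]
        · -- swap branch
          rw [if_neg (by simp [hA]), if_neg (by simp [hB])]
          set x := s[l] with hx
          set y := s[r] with hy
          have hcast : ((r : Int) + 1 = ((r + 1 : Nat) : Int)) ∧ ((l : Int) - 1 = ((l - 1 : Nat) : Int)) := by
            constructor <;> omega
          rw [show ((r : Int)).toNat = r by omega, show ((l : Int)).toNat = l by omega,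
              hcast.1, hcast.2]
          set s' := (s.set r x).set l y with hs'
          have hlen' : s'.length = s.length := by simp [hs']
          have := ih (l - 1 + 1 - (r + 1)) (by omega) s' (r + 1) (l - 1)
            (by omega) (by omega) rfl
          rw [this, show l - 1 + 1 = l by omega, show l - (r + 1) = l - r - 1 by omega]
          have E1 : s'.take (r + 1) = s.take r ++ [x] := by
            rw [hs', List.take_set_of_le (show r + 1 ≤ l by omega),
                List.take_succ_eq_append_getElem (by simp; omega),
                List.take_set_of_le (le_refl r)]
            simp
          have E2 : (s'.drop (r + 1)).take (l - r - 1) = (s.drop (r + 1)).take (l - r - 1) := by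
            rw [hs', List.drop_set, if_neg (by omega : ¬ l < r + 1),
                List.drop_set_of_lt (show r < r + 1 by omega),
                show l - (r + 1) = l - r - 1 by omega,
                List.take_set_of_le (le_refl (l - r - 1))]
          have E3 : s'.drop l = y :: s.drop (l + 1) := by
            rw [hs', List.drop_set, if_neg (by omega : ¬ l < l), Nat.sub_self,
                List.drop_set_of_lt (show r < l by omega),
                List.drop_eq_getElem_cons hl]
            simp only [List.set_cons_zero]
          have E4 : (s.drop r).take (l + 1 - r)
              = y :: ((s.drop (r + 1)).take (l - r - 1)) ++ [x] := by
            rw [List.drop_eq_getElem_cons hrlen, ← hy,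
                show l + 1 - r = (l - r - 1 + 1) + 1 by omega,
                List.take_succ_cons,
                List.take_succ_eq_append_getElem (by simp; omega)]
            have : (s.drop (r + 1))[l - r - 1]'(by simp; omega) = x := by
              rw [List.getElem_drop]
              rw [hx]
              congr 1
              omega
            rw [this]
            simp
          rw [E1, E2, E3, E4, pvPlace_both_alpha y x _ (by rw [hy]; exact hA) (by rw [hx]; exact hB)]
          simp
        · -- right end not alpha: l decreases
          rw [if_neg (by simp [hA]), if_pos (by simp [hB])]
          rw [show ((l : Int) - 1) = ((l - 1 : Nat) : Int) by omega]
          have := ih (l - 1 + 1 - r) (by omega) s r (l - 1) (by omega) (by omega) rfl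
          rw [this]
          have E4 : (s.drop r).take (l + 1 - r)
              = (s.drop r).take (l - 1 + 1 - r) ++ [s[l]] := by
            rw [show l + 1 - r = (l - 1 + 1 - r) + 1 by omega,
                List.take_succ_eq_append_getElem (by simp; omega)]
            congr 2
            rw [List.getElem_drop]
            congr 1
            omega
          rw [E4, pvPlace_concat_notalpha _ _ hB]
          rw [show l - 1 + 1 = l by omega, List.drop_eq_getElem_cons hl]
          simp
      · -- left end not alpha: r increases
        rw [if_pos (by simp [hA])]
        rw [show ((r : Int) + 1) = ((r + 1 : Nat) : Int) by omega]
        have := ih (l + 1 - (r + 1)) (by omega) s (r + 1) l hl (by omega) rfl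
        rw [this]
        have E4 : (s.drop r).take (l + 1 - r)
            = s[r] :: (s.drop (r + 1)).take (l + 1 - (r + 1)) := by
          rw [List.drop_eq_getElem_cons hrlen,
              show l + 1 - r = (l + 1 - (r + 1)) + 1 by omega,
              List.take_succ_cons]
        rw [E4, pvPlace_cons_notalpha _ _ hA,
            List.take_succ_eq_append_getElem hrlen]
        simp only [List.append_assoc, List.cons_append, List.nil_append]
    · rw [pvRevLoopA, dif_neg (by exact_mod_cast hcmp)]
      rcases (by omega : r = l ∨ r = l + 1) with h | h
      · subst h
        have hseg : (s.drop r).take (r + 1 - r) = [s[r]] := by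
          rw [show r + 1 - r = 1 by omega, List.drop_eq_getElem_cons hl,
              List.take_succ_cons, List.take_zero]
        rw [hseg, pvPlace_singleton,
            show s.take r ++ [s[r]] ++ s.drop (r + 1) = s.take r ++ (s[r] :: s.drop (r + 1)) by simp,
            ← List.drop_eq_getElem_cons hl, List.take_append_drop]
      · subst h
        simp [pvPlace, pvMerge, List.take_append_drop]

theorem pvPlace_full (s : List Char) :
    pvMerge s ((s.filter (fun c => PySem.Chars.isalpha c)).reverse) = pvPlace s := by
  rw [pvPlace, show (fun c => PySem.Chars.isalpha c) = pvAlpha from rfl]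

-- ===== VERDICT (by name: the statement is the Claim_ definition above) =====
theorem reverse_characters_spec : Claim_equal_reverse_characters := by
  intro string _
  show reverse_characters string = reverse_characters_alt string
  unfold reverse_characters reverse_characters_alt
  dsimp only
  rw [pvPlace_full]
  cases hs : string.toList with
  | nil => simp [pvRevLoopA, pvPlace, pvMerge]
  | cons c t =>
    have hlen : (c :: t).length - 1 < (c :: t).length := by simp
    have h1 : (c :: t).length = t.length + 1 := by simp
    have h0 : ((c :: t).length : Int) - 1 = (((c :: t).length - 1 : Nat) : Int) := by
      omega
    rw [h0, show (0 : Int) = ((0 : Nat) : Int) by rfl,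
        pvLoop_eq ((c :: t).length - 1 + 1 - 0) (c :: t) 0 ((c :: t).length - 1) hlen (by omega) rfl]
    simp
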